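-- pv_equiv track=rewrite | github.com/avllgrn/2CM8Parcial1 | ejemplo.py | generaMatrizConteoDerIzqArrAba
-- ===== SOURCE A (Python) =====
-- def generaMatrizCeros(m, n):
--     M = []
--     for i in range(m):
--         fila = []
--         for j in range(n):
--             fila.append( 0 )
--         M.append( fila )
--     return M
--
-- def generaMatrizConteoDerIzqArrAba(m, n, ini, inc):
--     M = generaMatrizCeros(m,n)
--
--     contador = ini
--     for i in range(m):
--         for j in range(n-1, -1, -1):
--             M[i][j] = contador
--             contador += inc
--
--     return M
-- ===== SOURCE B (Python) =====
-- def generaMatrizConteoDerIzqArrAba(m, n, ini, inc):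
--     # generate all cells' values linearly by repeated addition, then reshape:
--     # row i is the slice vals[i*n:(i+1)*n] reversed (right-to-left placement)
--     vals = []
--     c = ini
--     for _ in range(max(m, 0) * max(n, 0)):
--         vals.append(c)
--         c += inc
--     return [vals[i * n:(i + 1) * n][::-1] for i in range(m)]
-- ===== Notes on version B (the rewrite author's own statement) =====
-- stated objective: alternative
-- what changed: Replaces the nested in-place index-assignment loops (zero matrix + reversed column writes) by a flat linear value generation followed by a reshape into reversed row slices.
import Mathlib
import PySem

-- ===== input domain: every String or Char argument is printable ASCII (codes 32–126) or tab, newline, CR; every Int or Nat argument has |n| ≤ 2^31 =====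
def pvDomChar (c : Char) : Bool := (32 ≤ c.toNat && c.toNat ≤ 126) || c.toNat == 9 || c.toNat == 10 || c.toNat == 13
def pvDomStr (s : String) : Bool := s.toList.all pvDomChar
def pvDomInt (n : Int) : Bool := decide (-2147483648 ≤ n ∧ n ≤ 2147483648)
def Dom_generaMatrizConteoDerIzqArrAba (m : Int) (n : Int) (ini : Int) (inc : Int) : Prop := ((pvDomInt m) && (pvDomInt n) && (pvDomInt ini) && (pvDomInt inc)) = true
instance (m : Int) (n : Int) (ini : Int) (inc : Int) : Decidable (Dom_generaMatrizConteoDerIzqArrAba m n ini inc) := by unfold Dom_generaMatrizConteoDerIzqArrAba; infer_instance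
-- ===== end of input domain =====

-- B replaces the nested in-place index-assignment loops of A by linear value
-- generation followed by a reshape into reversed row slices (objective: alternative).

-- ===== PORT A =====
-- helper: generaMatrizCeros(m, n) — builds the m×n zero matrix row by row
def generaMatrizCeros (m : Int) (n : Int) : List (List Int) :=
  (PySem.List.pyRange 0 m 1).foldl
    (fun M _ => M ++ [(PySem.List.pyRange 0 n 1).foldl (fun fila _ => fila ++ [(0 : Int)]) []])
    []

-- M[i][j] = contador (i, j are always in range here) ported as pyGetD/pySetD
def generaMatrizConteoDerIzqArrAba (m : Int) (n : Int) (ini : Int) (inc : Int) : List (List Int) :=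
  ((PySem.List.pyRange 0 m 1).foldl
      (fun (st : List (List Int) × Int) i =>
        (PySem.List.pyRange (n - 1) (-1) (-1)).foldl
          (fun (st : List (List Int) × Int) j =>
            (PySem.List.pySetD st.1 i
              (PySem.List.pySetD (PySem.List.pyGetD st.1 i []) j st.2),
             st.2 + inc))
          st)
      (generaMatrizCeros m n, ini)).1

-- ===== PORT B =====
def generaMatrizConteoDerIzqArrAba_alt (m : Int) (n : Int) (ini : Int) (inc : Int) : List (List Int) :=
  let vals :=
    ((PySem.List.pyRange 0 (max m 0 * max n 0) 1).foldl
        (fun (st : List Int × Int) _ => (st.1 ++ [st.2], st.2 + inc)) ([], ini)).1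
  (PySem.List.pyRange 0 m 1).map
    (fun i => (PySem.List.slice vals (some (i * n)) (some ((i + 1) * n))).reverse)

-- ===== PRECONDITION & SPEC =====
def Spec_generaMatrizConteoDerIzqArrAba (m : Int) (n : Int) (ini : Int) (inc : Int) (out : List (List Int)) : Prop := out = generaMatrizConteoDerIzqArrAba_alt m n ini inc
instance (m : Int) (n : Int) (ini : Int) (inc : Int) (out : List (List Int)) : Decidable (Spec_generaMatrizConteoDerIzqArrAba m n ini inc out) := by unfold Spec_generaMatrizConteoDerIzqArrAba; infer_instance

-- ===== CLAIM (what is proved, stated in full; the proofs are below) =====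
def Claim_equal_generaMatrizConteoDerIzqArrAba : Prop := ∀ (m : Int) (n : Int) (ini : Int) (inc : Int), Dom_generaMatrizConteoDerIzqArrAba m n ini inc → Spec_generaMatrizConteoDerIzqArrAba m n ini inc (generaMatrizConteoDerIzqArrAba m n ini inc)

-- ===== LEMMAS AND PROOFS =====

-- A's zero matrix is replicate of replicate
lemma pvCerosEq (m n : Int) :
    generaMatrizCeros m n = List.replicate m.toNat (List.replicate n.toNat (0 : Int)) := by
  unfold generaMatrizCeros
  rw [PySem.List.pyRange_one 0 n, PySem.List.pyRange_one 0 m, List.foldl_map, List.foldl_map]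
  rw [PySem.List.foldl_append_singleton_eq_map (fun _ => (0 : Int))]
  rw [PySem.List.foldl_append_singleton_eq_map
        (fun _ => [] ++ List.map (fun _ => (0 : Int)) (List.range (n - 0).toNat))]
  simp [List.map_const']

-- A's inner loop on a single row: after K writes (j = N-1 down to N-K) the row is
-- its old prefix followed by the written suffix, and the counter advanced K times
lemma pvRowFold (inc : Int) (N : Nat) :
    ∀ (K : Nat), K ≤ N → ∀ (r : List Int) (c : Int), r.length = N →
      (List.range K).foldl
        (fun (st : List Int × Int) (k : Nat) =>
          (PySem.List.pySetD st.1 ((N : Int) - 1 - (k : Int)) st.2, st.2 + inc)) (r, c)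
      = (r.take (N - K) ++ (List.range K).map (fun (t : Nat) => c + ((K : Int) - 1 - (t : Int)) * inc),
         c + (K : Int) * inc) := by
  intro K
  induction K with
  | zero => intro _ r c hr; simp [List.take_of_length_le (le_of_eq hr)]
  | succ K ih =>
    intro hK r c hr
    conv_lhs => rw [List.range_succ]
    rw [List.foldl_append, ih (by omega) r c hr]
    simp only [List.foldl_cons, List.foldl_nil]
    have hcast : ((N : Int) - 1 - (K : Int)) = ((N - 1 - K : Nat) : Int) := by omega
    rw [hcast, PySem.List.pySetD_natCast]
    have hlt : N - 1 - K < (List.take (N - K) r).length := by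
      rw [List.length_take]; omega
    rw [List.set_append_left _ _ hlt, List.set_eq_take_cons_drop _ hlt,
        List.take_take, Nat.min_eq_left (by omega), List.drop_take]
    have hdp : N - K - (N - 1 - K + 1) = 0 := by omega
    rw [hdp, List.take_zero]
    simp only [Prod.mk.injEq]
    refine ⟨?_, by push_cast; ring⟩
    have h2 : N - (K + 1) = N - 1 - K := by omega
    rw [h2, List.range_succ_eq_map, List.map_cons, List.map_map, List.append_assoc,
        List.singleton_append]
    congr 1
    congr 1
    · push_cast; ring
    · apply List.map_congr_left
      intro t _
      simp only [Function.comp_apply]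
      push_cast; ring

-- A's inner loop only touches row i of the matrix
lemma pvLocalize (inc : Int) (js : List Int) :
    ∀ (M : List (List Int)) (i : Nat), i < M.length → ∀ (c : Int),
      js.foldl
        (fun (st : List (List Int) × Int) j =>
          (PySem.List.pySetD st.1 (i : Int)
            (PySem.List.pySetD (PySem.List.pyGetD st.1 (i : Int) []) j st.2),
           st.2 + inc)) (M, c)
      = (M.set i (js.foldl (fun (st : List Int × Int) j =>
            (PySem.List.pySetD st.1 j st.2, st.2 + inc)) (M.getD i [], c)).1,
         (js.foldl (fun (st : List Int × Int) j =>
            (PySem.List.pySetD st.1 j st.2, st.2 + inc)) (M.getD i [], c)).2) := by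
  induction js with
  | nil =>
    intro M i hi c
    simp only [List.foldl_nil]
    rw [List.getD_eq_getElem _ _ hi, List.set_getElem_self]
  | cons j js ih =>
    intro M i hi c
    simp only [List.foldl_cons]
    rw [PySem.List.pyGetD_natCast M i, PySem.List.pySetD_natCast M i]
    rw [ih (M.set i (PySem.List.pySetD (M.getD i []) j c)) i (by simpa using hi) (c + inc)]
    rw [List.getD_eq_getElem _ _ (by simpa using hi : i < (M.set i (PySem.List.pySetD (M.getD i []) j c)).length),
        List.getElem_set_self (by simpa using hi), List.set_set]

-- B's flat value list: repeated append of the running counter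
lemma pvValsFold (inc : Int) :
    ∀ (L : Nat) (acc : List Int) (c : Int),
      (List.range L).foldl (fun (st : List Int × Int) _ => (st.1 ++ [st.2], st.2 + inc)) (acc, c)
      = (acc ++ (List.range L).map (fun (k : Nat) => c + (k : Int) * inc), c + (L : Int) * inc) := by
  intro L
  induction L with
  | zero => intro acc c; simp
  | succ L ih =>
    intro acc c
    conv_lhs => rw [List.range_succ]
    rw [List.foldl_append, ih acc c]
    simp only [List.foldl_cons, List.foldl_nil, Prod.mk.injEq]
    refine ⟨?_, by push_cast; ring⟩
    rw [List.range_succ, List.map_append, List.append_assoc, List.map_singleton]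

lemma pvRevMapRange (N : Nat) (f : Nat → Int) :
    ((List.range N).map f).reverse = (List.range N).map (fun j => f (N - 1 - j)) := by
  apply List.ext_getElem
  · simp
  · intro i h1 h2
    simp at h1 h2 ⊢

lemma pvDropTakeRange (L a b : Nat) (h : a + b ≤ L) :
    ((List.range L).drop a).take b = (List.range b).map (fun (t : Nat) => a + t) := by
  apply List.ext_getElem
  · simp; omega
  · intro i h1 h2
    simp

-- A's outer loop invariant: after K rows, rows 0..K-1 are filled, the rest is zeros,
-- and the counter is ini + K*N*inc
lemma pvOuterA (ini inc : Int) (N mT : Nat) :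
    ∀ (K : Nat), K ≤ mT →
      (List.range K).foldl
        (fun (st : List (List Int) × Int) (k : Nat) =>
          (PySem.List.pyRange ((N : Int) - 1) (-1) (-1)).foldl
            (fun (st : List (List Int) × Int) j =>
              (PySem.List.pySetD st.1 (k : Int)
                (PySem.List.pySetD (PySem.List.pyGetD st.1 (k : Int) []) j st.2),
               st.2 + inc)) st)
        (List.replicate mT (List.replicate N (0 : Int)), ini)
      = ((List.range K).map (fun i => (List.range N).map
            (fun (t : Nat) => ini + ((i * N : Nat) : Int) * inc + ((N : Int) - 1 - (t : Int)) * inc))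
          ++ List.replicate (mT - K) (List.replicate N (0 : Int)),
         ini + ((K * N : Nat) : Int) * inc) := by
  intro K
  induction K with
  | zero => simp
  | succ K ih =>
    intro hK
    conv_lhs => rw [List.range_succ]
    rw [List.foldl_append, ih (by omega)]
    simp only [List.foldl_cons, List.foldl_nil]
    have hlen : K < ((List.range K).map (fun i => (List.range N).map
          (fun (t : Nat) => ini + ((i * N : Nat) : Int) * inc + ((N : Int) - 1 - (t : Int)) * inc))
        ++ List.replicate (mT - K) (List.replicate N (0 : Int))).length := by
      simp; omega
    rw [pvLocalize inc _ _ K hlen]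
    have hgetD : ((List.range K).map (fun i => (List.range N).map
          (fun (t : Nat) => ini + ((i * N : Nat) : Int) * inc + ((N : Int) - 1 - (t : Int)) * inc))
        ++ List.replicate (mT - K) (List.replicate N (0 : Int))).getD K []
        = List.replicate N (0 : Int) := by
      rw [List.getD_eq_getElem _ _ hlen, List.getElem_append_right (by simp)]
      simp
    rw [hgetD, PySem.List.pyRange_neg_one]
    have hNt : (((N : Int) - 1) - (-1)).toNat = N := by omega
    rw [hNt, List.foldl_map]
    rw [pvRowFold inc N N le_rfl _ _ (by simp)]
    simp only [Nat.sub_self, List.take_zero, List.nil_append, Prod.mk.injEq]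
    refine ⟨?_, by push_cast; ring⟩
    rw [List.set_append_right _ _ (by simp)]
    have hsp : mT - K = (mT - (K + 1)) + 1 := by omega
    rw [List.length_map, List.length_range, Nat.sub_self, hsp, List.replicate_succ,
        List.set_cons_zero, List.range_succ, List.map_append, List.append_assoc,
        List.map_singleton, List.singleton_append]

-- ===== VERDICT (by name: the statement is the Claim_ definition above) =====
-- the two sides written as explicit range-maps
lemma pvAEq (m n ini inc : Int) (N mT : Nat) (hn : n = (N : Int)) (hm : m = (mT : Int)) :
    generaMatrizConteoDerIzqArrAba m n ini inc
    = (List.range mT).map (fun i => (List.range N).map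
        (fun (t : Nat) => ini + ((i * N : Nat) : Int) * inc + ((N : Int) - 1 - (t : Int)) * inc)) := by
  subst hn hm
  unfold generaMatrizConteoDerIzqArrAba
  rw [pvCerosEq, PySem.List.pyRange_one 0 mT]
  have h0 : ((mT : Int) - 0).toNat = mT := by omega
  rw [h0, List.foldl_map]
  simp only [zero_add, Int.toNat_natCast]
  rw [pvOuterA ini inc N mT mT le_rfl]
  simp

lemma pvBEq (m n ini inc : Int) (N mT : Nat) (hn : n = (N : Int)) (hm : m = (mT : Int)) :
    generaMatrizConteoDerIzqArrAba_alt m n ini inc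
    = (List.range mT).map (fun i => (List.range N).map
        (fun (j : Nat) => ini + ((i * N + (N - 1 - j) : Nat) : Int) * inc)) := by
  subst hn hm
  unfold generaMatrizConteoDerIzqArrAba_alt
  have hmn : max ((mT : Int)) 0 * max ((N : Int)) 0 = ((mT * N : Nat) : Int) := by
    rw [max_eq_left (Int.natCast_nonneg mT), max_eq_left (Int.natCast_nonneg N)]
    push_cast; ring
  rw [hmn, PySem.List.pyRange_one 0 ((mT * N : Nat) : Int)]
  have h1 : (((mT * N : Nat) : Int) - 0).toNat = mT * N := by omega
  rw [h1, List.foldl_map, pvValsFold inc (mT * N) [] ini, PySem.List.pyRange_one 0 mT]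
  have h0 : ((mT : Int) - 0).toNat = mT := by omega
  rw [h0, List.map_map]
  simp only [List.nil_append]
  apply List.map_congr_left
  intro k hk
  rw [List.mem_range] at hk
  simp only [Function.comp_apply, zero_add]
  have h2 : (k : Int) * (N : Int) = ((k * N : Nat) : Int) := by push_cast; ring
  have h3 : ((k : Int) + 1) * (N : Int) = ((k * N : Nat) : Int) + ((N : Nat) : Int) := by
    push_cast; ring
  rw [h2, h3, PySem.List.slice_natCast_add, ← List.map_drop, ← List.map_take]
  have hle : k * N + N ≤ mT * N := by
    rw [← Nat.succ_mul]
    exact Nat.mul_le_mul_right N hk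
  rw [pvDropTakeRange (mT * N) (k * N) N hle, List.map_map, pvRevMapRange]
  apply List.map_congr_left
  intro j hj
  simp only [Function.comp_apply]

-- ===== VERDICT (by name: the statement is the Claim_ definition above) =====
theorem generaMatrizConteoDerIzqArrAba_spec : Claim_equal_generaMatrizConteoDerIzqArrAba := by
  intro m n ini inc _hdom
  unfold Spec_generaMatrizConteoDerIzqArrAba
  by_cases hn : 0 < n
  · -- n > 0
    obtain ⟨N, rfl⟩ : ∃ N : Nat, n = (N : Int) := ⟨n.toNat, (Int.toNat_of_nonneg hn.le).symm⟩
    have hN : 0 < N := by exact_mod_cast hn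
    by_cases hm : 0 < m
    · obtain ⟨mT, rfl⟩ : ∃ mT : Nat, m = (mT : Int) := ⟨m.toNat, (Int.toNat_of_nonneg hm.le).symm⟩
      rw [pvAEq _ _ ini inc N mT rfl rfl, pvBEq _ _ ini inc N mT rfl rfl]
      apply List.map_congr_left
      intro i _
      apply List.map_congr_left
      intro j hj
      rw [List.mem_range] at hj
      have hc : ((i * N + (N - 1 - j) : Nat) : Int)
          = ((i * N : Nat) : Int) + ((N : Int) - 1 - (j : Int)) := by
        generalize i * N = a
        omega
      rw [hc]; ring
    · -- m ≤ 0 : both sides are []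
      rw [not_lt] at hm
      have hA : PySem.List.pyRange 0 m 1 = [] := PySem.List.pyRange_one_eq_nil (by omega)
      unfold generaMatrizConteoDerIzqArrAba generaMatrizConteoDerIzqArrAba_alt
      rw [hA]
      simp [pvCerosEq, List.foldl_nil, Int.toNat_of_nonpos hm]
  · -- n ≤ 0 : every row is empty
    rw [not_lt] at hn
    unfold generaMatrizConteoDerIzqArrAba generaMatrizConteoDerIzqArrAba_alt
    have hin : PySem.List.pyRange (n - 1) (-1) (-1) = [] :=
      PySem.List.pyRange_neg_one_eq_nil (by omega)
    rw [hin]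
    simp only [List.foldl_nil, List.foldl_fixed, pvCerosEq, Int.toNat_of_nonpos hn,
      List.replicate_zero]
    by_cases hm : 0 < m
    · -- vals is empty since m*n ≤ 0
      have hv : PySem.List.pyRange 0 (max m 0 * max n 0) 1 = [] :=
        PySem.List.pyRange_one_eq_nil (by rw [max_eq_right hn]; simp)
      rw [hv]
      simp only [List.foldl_nil]
      rw [PySem.List.pyRange_one 0 m]
      rw [List.map_map]
      have : ∀ i : Int, (PySem.List.slice ([] : List Int) (some (i * n))
          (some ((i + 1) * n))).reverse = ([] : List Int) := by
        intro i; simp [PySem.List.slice]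
      simp only [Function.comp_def, this, List.map_const', List.length_range]
      rw [show (m - 0).toNat = m.toNat by omega]
    · rw [not_lt] at hm
      have hA : PySem.List.pyRange 0 m 1 = [] := PySem.List.pyRange_one_eq_nil (by omega)
      rw [hA]
      simp [Int.toNat_of_nonpos hm]
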